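-- pv_equiv track=rewrite | github.com/geekpuant67/go_game_kaya | app.py | get_territory
-- ===== SOURCE A (Python) =====
-- def get_territory(board, size=9):
--     """ Flood Fill algorithm to count (Referee) """
--     visited = set()
--     black_t, white_t = 0, 0
--     for r in range(size):
--         for c in range(size):
--             if board[r][c] is None and (r, c) not in visited:
--                 group, stack = [], [(r, c)]
--                 reached_colors = set()
--                 while stack:
--                     curr_r, curr_c = stack.pop()
--                     if (curr_r, curr_c) in visited: continue
--                     visited.add((curr_r, curr_c))
--                     group.append((curr_r, curr_c))
--                     for dr, dc in [(-1,0), (1,0), (0,-1), (0,1)]: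
--                         nr, nc = curr_r + dr, curr_c + dc
--                         if 0 <= nr < size and 0 <= nc < size:
--                             if board[nr][nc] is None: stack.append((nr, nc))
--                             else: reached_colors.add(board[nr][nc])
--                 if len(reached_colors) == 1:
--                     color = reached_colors.pop()
--                     if color == 'black': black_t += len(group)
--                     elif color == 'white': white_t += len(group)
--     return black_t, white_t
-- ===== SOURCE B (Python) =====
-- def get_territory(board, size=9):
--     """Count territory by computing each empty region as a set-closure
--     (round-based saturation to a fixpoint) instead of a DFS stack walk."""
--     empties = [(r, c) for r in range(size) for c in range(size) if board[r][c] is None]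
--     empty_set = set(empties)
--     visited = set()
--     black_t, white_t = 0, 0
--     for start in empties:
--         if start in visited:
--             continue
--         comp = {start}
--         for _ in range(size * size):
--             new = set(comp)
--             for (r, c) in comp:
--                 for nb in ((r - 1, c), (r + 1, c), (r, c - 1), (r, c + 1)):
--                     if nb in empty_set:
--                         new.add(nb)
--             if new == comp:
--                 break
--             comp = new
--         visited |= comp
--         borders = set()
--         for (r, c) in comp:
--             for (nr, nc) in ((r - 1, c), (r + 1, c), (r, c - 1), (r, c + 1)):
--                 if 0 <= nr < size and 0 <= nc < size and board[nr][nc] is not None: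
--                     borders.add(board[nr][nc])
--         if len(borders) == 1:
--             col = borders.pop()
--             if col == 'black':
--                 black_t += len(comp)
--             elif col == 'white':
--                 white_t += len(comp)
--     return black_t, white_t
-- ===== Notes on version B (the rewrite author's own statement) =====
-- stated objective: alternative
-- what changed: A discovers each empty region by a depth-first flood fill with an explicit stack, collecting bordering colours cell by cell as it pops; B instead precomputes the list of empty cells, grows each region as a set by round-based closure (repeatedly adding all empty neighbours until a fixpoint), and only then scans the finished region once to collect its bordering colours.
import Mathlib
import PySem

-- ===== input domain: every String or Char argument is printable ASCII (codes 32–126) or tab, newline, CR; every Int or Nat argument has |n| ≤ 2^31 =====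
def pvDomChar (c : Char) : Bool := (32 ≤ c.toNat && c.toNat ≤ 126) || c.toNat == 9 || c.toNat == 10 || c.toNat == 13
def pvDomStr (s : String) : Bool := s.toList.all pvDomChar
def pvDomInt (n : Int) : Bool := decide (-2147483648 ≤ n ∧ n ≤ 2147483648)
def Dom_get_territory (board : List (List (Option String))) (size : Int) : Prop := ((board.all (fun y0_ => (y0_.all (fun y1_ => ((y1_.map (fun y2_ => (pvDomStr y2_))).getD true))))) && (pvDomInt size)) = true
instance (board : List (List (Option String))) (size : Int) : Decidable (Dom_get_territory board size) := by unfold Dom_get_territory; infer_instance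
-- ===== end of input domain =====

-- B replaces A's stack-based depth-first flood fill by a round-based set-closure
-- (saturate each empty region to a fixpoint, then scan its border in a second pass);
-- objective: alternative (genuinely different traversal, similar cost).

-- ===== PORT A =====
def boardGetA (board : List (List (Option String))) (r c : Int) : Option String :=
  PySem.List.pyGetD (PySem.List.pyGetD board r []) c none

def pvInRA (size : Int) (p : Int × Int) : Bool :=
  0 ≤ p.1 && p.1 < size && 0 ≤ p.2 && p.2 < size

def pvDirs : List (Int × Int) := [(-1,0),(1,0),(0,-1),(0,1)]

def fillA (board : List (List (Option String))) (size : Int) :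
    Nat → List (Int × Int) → PySem.Set (Int × Int) → List (Int × Int) → PySem.Set String →
    PySem.Set (Int × Int) × List (Int × Int) × PySem.Set String
  | 0, _, visited, group, colors => (visited, group, colors)
  | _ + 1, [], visited, group, colors => (visited, group, colors)
  | fuel + 1, p :: stack, visited, group, colors =>
    if PySem.Set.contains visited p then
      fillA board size fuel stack visited group colors
    else
      let st := pvDirs.foldl
        (fun (acc : List (Int × Int) × PySem.Set String) d =>
          let n := (p.1 + d.1, p.2 + d.2)
          if pvInRA size n then
            match boardGetA board n.1 n.2 with
            | none => (acc.1 ++ [n], acc.2)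
            | some col => (acc.1, PySem.Set.add acc.2 col)
          else acc)
        ([], colors)
      fillA board size fuel (st.1.reverse ++ stack) (PySem.Set.add visited p) (group ++ [p]) st.2

def get_territory (board : List (List (Option String))) (size : Int) : Int × Int :=
  let res := (PySem.List.pyRange 0 size 1).foldl
    (fun (acc : PySem.Set (Int × Int) × Int × Int) r =>
      (PySem.List.pyRange 0 size 1).foldl
        (fun acc c =>
          if boardGetA board r c = none ∧ ¬ ((r, c) ∈ acc.1) then
            let st := fillA board size (1 + 5 * (size.toNat * size.toNat)) [(r, c)] acc.1 [] PySem.Set.empty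
            match st.2.2 with
            | [col] =>
              if col = "black" then (st.1, acc.2.1 + (st.2.1.length : Int), acc.2.2)
              else if col = "white" then (st.1, acc.2.1, acc.2.2 + (st.2.1.length : Int))
              else (st.1, acc.2.1, acc.2.2)
            | _ => (st.1, acc.2.1, acc.2.2)
          else acc)
        acc)
    (PySem.Set.empty, 0, 0)
  res.2

-- ===== PORT B =====
def boardGet (board : List (List (Option String))) (r c : Int) : Option String :=
  PySem.List.pyGetD (PySem.List.pyGetD board r []) c none

def pvInR (size : Int) (p : Int × Int) : Bool :=
  0 ≤ p.1 && p.1 < size && 0 ≤ p.2 && p.2 < size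

def nbrsB (p : Int × Int) : List (Int × Int) :=
  [(p.1 - 1, p.2), (p.1 + 1, p.2), (p.1, p.2 - 1), (p.1, p.2 + 1)]

def satStep (emptySet : PySem.Set (Int × Int)) (comp : PySem.Set (Int × Int)) : PySem.Set (Int × Int) :=
  comp.foldl
    (fun new p => (nbrsB p).foldl
      (fun new nb => if PySem.Set.contains emptySet nb then PySem.Set.add new nb else new) new)
    comp

def saturate (emptySet : PySem.Set (Int × Int)) : Nat → PySem.Set (Int × Int) → PySem.Set (Int × Int)
  | 0, comp => comp
  | fuel + 1, comp =>
    let new := satStep emptySet comp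
    if PySem.Set.equal new comp then comp else saturate emptySet fuel new

def bordersOf (board : List (List (Option String))) (size : Int) (comp : PySem.Set (Int × Int)) :
    PySem.Set String :=
  comp.foldl
    (fun bs p => (nbrsB p).foldl
      (fun bs nb =>
        if pvInR size nb then
          match boardGet board nb.1 nb.2 with
          | some col => PySem.Set.add bs col
          | none => bs
        else bs) bs)
    PySem.Set.empty

def pvEmpties (board : List (List (Option String))) (size : Int) : List (Int × Int) :=
  (PySem.List.pyRange 0 size 1).flatMap (fun r =>
    ((PySem.List.pyRange 0 size 1).filter (fun c => boardGet board r c == none)).map (fun c => (r, c)))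

def get_territory_alt (board : List (List (Option String))) (size : Int) : Int × Int :=
  let empties := pvEmpties board size
  let emptySet := PySem.Set.ofList empties
  let res := empties.foldl
    (fun (acc : PySem.Set (Int × Int) × Int × Int) start =>
      if PySem.Set.contains acc.1 start then acc
      else
        let comp := saturate emptySet ((size * size).toNat) (PySem.Set.add PySem.Set.empty start)
        let visited' := PySem.Set.update acc.1 comp
        let borders := bordersOf board size comp
        if borders.length = 1 then
          let col := borders.headD ""
          if col = "black" then (visited', acc.2.1 + (comp.length : Int), acc.2.2)
          else if col = "white" then (visited', acc.2.1, acc.2.2 + (comp.length : Int))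
          else (visited', acc.2.1, acc.2.2)
        else (visited', acc.2.1, acc.2.2))
    (PySem.Set.empty, 0, 0)
  res.2

-- ===== PRECONDITION & SPEC =====
-- Pre_ excludes exactly the inputs on which A raises IndexError: a positive size such
-- that the board has fewer than size rows, or one of the first size rows has fewer than
-- size cells.  On every input it admits, A returns normally.
def Pre_get_territory (board : List (List (Option String))) (size : Int) : Prop :=
  size ≤ 0 ∨ (size ≤ (board.length : Int) ∧ ∀ row ∈ board.take size.toNat, size ≤ (row.length : Int))
instance (board : List (List (Option String))) (size : Int) : Decidable (Pre_get_territory board size) := by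
  unfold Pre_get_territory; infer_instance

def pvWitness_get_territory : List (List (Option String)) × Int := ([[none]], 1)

def Spec_get_territory (board : List (List (Option String))) (size : Int) (out : Int × Int) : Prop := out = get_territory_alt board size
instance (board : List (List (Option String))) (size : Int) (out : Int × Int) : Decidable (Spec_get_territory board size out) := by unfold Spec_get_territory; infer_instance

-- ===== CLAIM (what is proved, stated in full; the proofs are below) =====
def Claim_equal_get_territory : Prop := ∀ (board : List (List (Option String))) (size : Int), Dom_get_territory board size → Pre_get_territory board size → Spec_get_territory board size (get_territory board size)

-- ===== LEMMAS AND PROOFS =====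

/-- An in-range empty cell (the ports agree on `boardGet` everywhere, so this is the
common notion of "empty cell" used by both sides of the proof). -/
def pvEmptyB (board : List (List (Option String))) (size : Int) (p : Int × Int) : Bool :=
  pvInR size p && (boardGet board p.1 p.2).isNone

lemma mem_nbrsB_symm {p q : Int × Int} (h : q ∈ nbrsB p) : p ∈ nbrsB q := by
  simp only [nbrsB, List.mem_cons, List.not_mem_nil, or_false] at h ⊢
  simp only [Prod.ext_iff] at h ⊢
  omega

/-- Reachability inside the empty cells (adjacency through 4-neighbours). -/
inductive pvReach (board : List (List (Option String))) (size : Int) : (Int × Int) → (Int × Int) → Prop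
  | refl (p : Int × Int) : pvReach board size p p
  | step {p q r : Int × Int} : pvReach board size p q → r ∈ nbrsB q →
      pvEmptyB board size r = true → pvReach board size p r

lemma pvReach_trans {board size} {p q r : Int × Int}
    (h1 : pvReach board size p q) (h2 : pvReach board size q r) : pvReach board size p r := by
  induction h2 with
  | refl => exact h1
  | step _ hmem hemp ih => exact pvReach.step ih hmem hemp

lemma pvReach_empty {board size} {p q : Int × Int}
    (hp : pvEmptyB board size p = true) (h : pvReach board size p q) :
    pvEmptyB board size q = true := by
  induction h with
  | refl => exact hp
  | step _ _ hemp _ => exact hemp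

lemma pvReach_symm {board size} {p q : Int × Int}
    (hp : pvEmptyB board size p = true) (h : pvReach board size p q) :
    pvReach board size q p := by
  induction h with
  | refl => exact .refl _
  | step hpq hmem hemp ih =>
    exact pvReach_trans (pvReach.step (.refl _) (mem_nbrsB_symm hmem) (pvReach_empty hp hpq)) ih

/-- `v` is closed under empty adjacency, up to cells still on the worklist `s`. -/
def pvClosedRel (board : List (List (Option String))) (size : Int)
    (v s : List (Int × Int)) : Prop :=
  ∀ p ∈ v, ∀ q ∈ nbrsB p, pvEmptyB board size q = true → q ∈ v ∨ q ∈ s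

lemma pvReach_escape {board size} {v s : List (Int × Int)} {p q : Int × Int}
    (hcl : pvClosedRel board size v s) (hp : p ∈ v) (h : pvReach board size p q) :
    q ∈ v ∨ ∃ t ∈ s, pvReach board size t q := by
  induction h with
  | refl => exact .inl hp
  | step hpq hmem hemp ih =>
    rcases ih with hv | ⟨t, ht, hr⟩
    · rcases hcl _ hv _ hmem hemp with h' | h'
      · exact .inl h'
      · exact .inr ⟨_, h', .refl _⟩
    · exact .inr ⟨t, ht, .step hr hmem hemp⟩

lemma mem_pvEmpties {board size} {p : Int × Int} :
    p ∈ pvEmpties board size ↔ pvEmptyB board size p = true := by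
  unfold pvEmpties pvEmptyB pvInR
  simp only [List.mem_flatMap, List.mem_map, List.mem_filter, PySem.List.mem_pyRange_one]
  constructor
  · rintro ⟨r, hr, c, ⟨hc, hbc⟩, rfl⟩
    simp only [beq_iff_eq] at hbc
    simp [hbc, hr.1, hr.2, hc.1, hc.2]
  · intro h
    simp only [Bool.and_eq_true, decide_eq_true_eq, Option.isNone_iff_eq_none] at h
    exact ⟨p.1, ⟨h.1.1.1.1, h.1.1.1.2⟩, p.2, ⟨⟨h.1.1.2, h.1.2⟩, by simp [h.2]⟩, rfl⟩

lemma nodup_pvEmpties {board size} : (pvEmpties board size).Nodup := by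
  unfold pvEmpties
  have H : ∀ (l : List Int), l.Nodup →
      (l.flatMap (fun r => ((PySem.List.pyRange 0 size 1).filter
        (fun c => boardGet board r c == none)).map (fun c => (r, c)))).Nodup := by
    intro l hl
    induction l with
    | nil => simp
    | cons a t ih =>
      rcases List.nodup_cons.mp hl with ⟨ha, ht⟩
      rw [List.flatMap_cons, List.nodup_append]
      refine ⟨?_, ih ht, ?_⟩
      · exact (List.Nodup.filter _ (PySem.List.nodup_pyRange_one 0 size)).map
          (fun c₁ c₂ h => by simpa using congrArg Prod.snd h)
      · intro x hx b hb
        obtain ⟨c, _, rfl⟩ := List.mem_map.mp hx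
        obtain ⟨r, hr, hm⟩ := List.mem_flatMap.mp hb
        obtain ⟨c', _, rfl⟩ := List.mem_map.mp hm
        intro heq
        have : r = a := by simpa using congrArg Prod.fst heq.symm
        exact ha (this ▸ hr)
  exact H _ (PySem.List.nodup_pyRange_one 0 size)

lemma length_pvEmpties_le {board size} :
    (pvEmpties board size).length ≤ size.toNat * size.toNat := by
  unfold pvEmpties
  rw [List.length_flatMap]
  have h1 : ∀ r ∈ (PySem.List.pyRange 0 size 1).map (fun r =>
      (((PySem.List.pyRange 0 size 1).filter (fun c => boardGet board r c == none)).map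
        (fun c => (r, c))).length), r ≤ size.toNat := by
    intro n hn
    simp only [List.mem_map] at hn
    obtain ⟨r, _, rfl⟩ := hn
    calc (((PySem.List.pyRange 0 size 1).filter (fun c => boardGet board r c == none)).map (fun c => (r, c))).length
        = ((PySem.List.pyRange 0 size 1).filter (fun c => boardGet board r c == none)).length := by simp
      _ ≤ (PySem.List.pyRange 0 size 1).length := List.length_filter_le _ _
      _ = size.toNat := by rw [PySem.List.length_pyRange_one]; omega
  have h2 := List.sum_le_card_nsmul _ _ h1
  simp only [smul_eq_mul] at h2
  refine h2.trans ?_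
  rw [List.length_map, PySem.List.length_pyRange_one]
  have hh : (size - 0).toNat ≤ size.toNat := by omega
  exact Nat.mul_le_mul_right _ hh

/-- A colour bordering the cell `p`. -/
def pvBorder (board : List (List (Option String))) (size : Int) (p : Int × Int) (c : String) : Prop :=
  ∃ q ∈ nbrsB p, pvInR size q = true ∧ boardGet board q.1 q.2 = some c

lemma pvDirs_map (p : Int × Int) :
    pvDirs.map (fun d => (p.1 + d.1, p.2 + d.2)) = nbrsB p := by
  simp [pvDirs, nbrsB, sub_eq_add_neg]

lemma dirsFold_spec (board : List (List (Option String))) (size : Int) (p : Int × Int) :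
    ∀ (ds : List (Int × Int)) (acc : List (Int × Int) × PySem.Set String),
    (ds.foldl (fun (acc : List (Int × Int) × PySem.Set String) d =>
        let n := (p.1 + d.1, p.2 + d.2)
        if pvInRA size n then
          match boardGetA board n.1 n.2 with
          | none => (acc.1 ++ [n], acc.2)
          | some col => (acc.1, PySem.Set.add acc.2 col)
        else acc) acc).1
      = acc.1 ++ ((ds.map (fun d => (p.1 + d.1, p.2 + d.2))).filter (pvEmptyB board size)) ∧
    (∀ c, c ∈ (ds.foldl (fun (acc : List (Int × Int) × PySem.Set String) d =>
        let n := (p.1 + d.1, p.2 + d.2)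
        if pvInRA size n then
          match boardGetA board n.1 n.2 with
          | none => (acc.1 ++ [n], acc.2)
          | some col => (acc.1, PySem.Set.add acc.2 col)
        else acc) acc).2 ↔ c ∈ acc.2 ∨ ∃ n ∈ ds.map (fun d => (p.1 + d.1, p.2 + d.2)),
          pvInR size n = true ∧ boardGet board n.1 n.2 = some c) ∧
    (acc.2.Nodup → (ds.foldl (fun (acc : List (Int × Int) × PySem.Set String) d =>
        let n := (p.1 + d.1, p.2 + d.2)
        if pvInRA size n then
          match boardGetA board n.1 n.2 with
          | none => (acc.1 ++ [n], acc.2)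
          | some col => (acc.1, PySem.Set.add acc.2 col)
        else acc) acc).2.Nodup) := by
  simp only [show boardGetA = boardGet from rfl, show pvInRA = pvInR from rfl]
  intro ds
  induction ds with
  | nil => intro acc; refine ⟨by simp, fun c => by simp, fun h => by simpa using h⟩
  | cons d t ih =>
    intro acc
    simp only [List.foldl_cons, List.map_cons, List.filter_cons]
    by_cases hin : pvInR size (p.1 + d.1, p.2 + d.2)
    · rcases hbg : boardGet board (p.1 + d.1) (p.2 + d.2) with _ | col
      · -- empty neighbour: pushed
        have hemp : pvEmptyB board size (p.1 + d.1, p.2 + d.2) = true := by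
          simp [pvEmptyB, hin, hbg]
        obtain ⟨I1, I2, I3⟩ := ih (acc.1 ++ [(p.1 + d.1, p.2 + d.2)], acc.2)
        refine ⟨?_, ?_, ?_⟩
        · rw [show ((t.foldl _ _ : List (Int × Int) × PySem.Set String)) = _ from rfl] at I1
          simpa [hin, hbg, hemp, List.append_assoc] using I1
        · intro c
          have := I2 c
          simp only [hin, if_true] at this ⊢
          simp only [this, List.mem_cons]
          constructor
          · rintro (h | ⟨n, hn, h1, h2⟩)
            · exact .inl h
            · exact .inr ⟨n, .inr hn, h1, h2⟩
          · rintro (h | ⟨n, (rfl | hn), h1, h2⟩)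
            · exact .inl h
            · rw [hbg] at h2; cases h2
            · exact .inr ⟨n, hn, h1, h2⟩
        · intro h
          have := I3 h
          simpa [hin, hbg] using this
      · -- coloured neighbour
        have hnemp : pvEmptyB board size (p.1 + d.1, p.2 + d.2) = false := by
          simp [pvEmptyB, hbg]
        obtain ⟨I1, I2, I3⟩ := ih (acc.1, PySem.Set.add acc.2 col)
        refine ⟨?_, ?_, ?_⟩
        · simpa [hin, hbg, hnemp] using I1
        · intro c
          have := I2 c
          simp only [hin, if_true] at this ⊢
          simp only [this, PySem.Set.mem_add, List.mem_cons]
          constructor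
          · rintro ((h | rfl) | ⟨n, hn, h1, h2⟩)
            · exact .inl h
            · exact .inr ⟨_, .inl rfl, hin, hbg⟩
            · exact .inr ⟨n, .inr hn, h1, h2⟩
          · rintro (h | ⟨n, (rfl | hn), h1, h2⟩)
            · exact .inl (.inl h)
            · rw [hbg] at h2; cases h2; exact .inl (.inr rfl)
            · exact .inr ⟨n, hn, h1, h2⟩
        · intro h
          have := I3 (show (PySem.Set.add acc.2 col).Nodup from PySem.Set.nodup_add _ _ h)
          simpa [hin, hbg] using this
    · -- out of range
      have hnin : pvInR size (p.1 + d.1, p.2 + d.2) = false := by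
        rw [← Bool.not_eq_true]; exact hin
      have hnemp : pvEmptyB board size (p.1 + d.1, p.2 + d.2) = false := by
        simp [pvEmptyB, hnin]
      obtain ⟨I1, I2, I3⟩ := ih acc
      refine ⟨by simpa [hnin, hnemp] using I1, ?_, by simpa [hnin] using I3⟩
      intro c
      have := I2 c
      simp only [hnin, Bool.false_eq_true, if_false] at this ⊢
      simp only [this, List.mem_cons]
      constructor
      · rintro (h | ⟨n, hn, h1, h2⟩)
        · exact .inl h
        · exact .inr ⟨n, .inr hn, h1, h2⟩
      · rintro (h | ⟨n, (rfl | hn), h1, h2⟩)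
        · exact .inl h
        · rw [hnin] at h1; cases h1
        · exact .inr ⟨n, hn, h1, h2⟩

lemma pvFree_succ (board : List (List (Option String))) (size : Int)
    (v : List (Int × Int)) (p : Int × Int)
    (hp : p ∈ pvEmpties board size) (hpv : p ∉ v) :
    ((pvEmpties board size).filter (fun x => !(PySem.Set.contains (v ++ [p]) x))).length + 1
      = ((pvEmpties board size).filter (fun x => !(PySem.Set.contains v x))).length := by
  have hcongr : (pvEmpties board size).filter (fun x => !(PySem.Set.contains (v ++ [p]) x))
      = ((pvEmpties board size).filter (fun x => !(PySem.Set.contains v x))).filter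
          (fun x => x != p) := by
    rw [List.filter_filter]
    apply List.filter_congr
    intro x _
    by_cases hxp : x = p <;> by_cases hxv : x ∈ v <;>
      simp [PySem.Set.contains_eq_listContains, List.contains_eq_mem, List.mem_append,
        hxp, hxv]
  have hnd : ((pvEmpties board size).filter (fun x => !(PySem.Set.contains v x))).Nodup :=
    nodup_pvEmpties.filter _
  have hmem : p ∈ (pvEmpties board size).filter (fun x => !(PySem.Set.contains v x)) := by
    simp [List.mem_filter, hp, PySem.Set.contains_eq_listContains, List.contains_eq_mem, hpv]
  rw [hcongr, ← List.Nodup.erase_eq_filter hnd, List.length_erase_of_mem hmem]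
  have hpos : 0 < ((pvEmpties board size).filter (fun x => !(PySem.Set.contains v x))).length :=
    List.length_pos_of_mem hmem
  omega

lemma fillA_spec (board : List (List (Option String))) (size : Int) :
    ∀ (fuel : Nat) (stack : List (Int × Int)) (v : PySem.Set (Int × Int))
      (g : List (Int × Int)) (cols : PySem.Set String),
    v.Nodup → cols.Nodup →
    (∀ p ∈ stack, pvEmptyB board size p = true) →
    pvClosedRel board size v stack →
    stack.length + 5 * ((pvEmpties board size).filter (fun x => !(PySem.Set.contains v x))).length ≤ fuel →
    ∃ nw : List (Int × Int),
      (fillA board size fuel stack v g cols).1 = v ++ nw ∧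
      (fillA board size fuel stack v g cols).2.1 = g ++ nw ∧
      (v ++ nw).Nodup ∧
      (∀ q, q ∈ v ++ nw ↔ q ∈ v ∨ ∃ t ∈ stack, pvReach board size t q) ∧
      (∀ c, c ∈ (fillA board size fuel stack v g cols).2.2 ↔
        c ∈ cols ∨ ∃ x ∈ nw, pvBorder board size x c) ∧
      (fillA board size fuel stack v g cols).2.2.Nodup := by
  intro fuel
  induction fuel with
  | zero =>
    intro stack v g cols hv hcols hstack hcl hfuel
    cases stack with
    | cons a t => exfalso; simp only [List.length_cons] at hfuel; omega
    | nil =>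
      refine ⟨[], by simp [fillA], by simp [fillA], by simpa using hv, ?_, fun c => by simp [fillA], by simpa [fillA] using hcols⟩
      intro q; simp
  | succ n ih =>
    intro stack v g cols hv hcols hstack hcl hfuel
    cases stack with
    | nil =>
      refine ⟨[], by simp [fillA], by simp [fillA], by simpa using hv, ?_, fun c => by simp [fillA], by simpa [fillA] using hcols⟩
      intro q; simp
    | cons p rest =>
      have hpe : pvEmptyB board size p = true := hstack p (by simp)
      by_cases hpv : p ∈ v
      · -- p already visited: skip
        have hc : PySem.Set.contains v p = true := by
          simp [PySem.Set.contains_eq_listContains, List.contains_eq_mem, hpv]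
        have hred : fillA board size (n+1) (p :: rest) v g cols
            = fillA board size n rest v g cols := by
          simp only [fillA, hc, if_true]
        have hcl' : pvClosedRel board size v rest := by
          intro a ha q hq hqe
          rcases hcl a ha q hq hqe with h1 | h1
          · exact .inl h1
          · rcases List.mem_cons.mp h1 with rfl | h2
            · exact .inl hpv
            · exact .inr h2
        obtain ⟨nw, H1, H2, H3, H4, H5, H6⟩ := ih rest v g cols hv hcols
          (fun q hq => hstack q (by simp [hq])) hcl'
          (by simp only [List.length_cons] at hfuel; omega)
        refine ⟨nw, by rw [hred]; exact H1, by rw [hred]; exact H2, H3, ?_,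
          fun c => by rw [hred]; exact H5 c, by rw [hred]; exact H6⟩
        intro q
        rw [H4 q]
        constructor
        · rintro (h1 | ⟨t, ht, hr⟩)
          · exact .inl h1
          · exact .inr ⟨t, by simp [ht], hr⟩
        · rintro (h1 | ⟨t, ht, hr⟩)
          · exact .inl h1
          · rcases List.mem_cons.mp ht with rfl | ht'
            · rcases pvReach_escape hcl' hpv hr with h2 | ⟨t', ht', hr'⟩
              · exact .inl h2
              · exact .inr ⟨t', ht', hr'⟩
            · exact .inr ⟨t, ht', hr⟩
      · -- p not visited: process it
        have hc : PySem.Set.contains v p = false := by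
          simp [PySem.Set.contains_eq_listContains, List.contains_eq_mem, hpv]
        obtain ⟨D1, D2, D3⟩ := dirsFold_spec board size p pvDirs ([], cols)
        rw [pvDirs_map] at D1 D2
        set F := pvDirs.foldl
          (fun (acc : List (Int × Int) × PySem.Set String) d =>
            let n := (p.1 + d.1, p.2 + d.2)
            if pvInRA size n then
              match boardGetA board n.1 n.2 with
              | none => (acc.1 ++ [n], acc.2)
              | some col => (acc.1, PySem.Set.add acc.2 col)
            else acc)
          ([], cols) with hF
        have hF1 : F.1 = (nbrsB p).filter (pvEmptyB board size) := by
          rw [D1]; simp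
        have hadd : PySem.Set.add v p = v ++ [p] := PySem.Set.add_of_not_mem hpv
        have hred : fillA board size (n+1) (p :: rest) v g cols
            = fillA board size n (F.1.reverse ++ rest) (v ++ [p]) (g ++ [p]) F.2 := by
          simp only [fillA, hc, Bool.false_eq_true, if_false, ← hF, hadd]
        have hv' : (v ++ [p]).Nodup := by
          rw [List.nodup_append]
          exact ⟨hv, List.nodup_singleton p, fun a ha b hb => by
            simp only [List.mem_singleton] at hb; subst hb
            exact fun hh => hpv (hh ▸ ha)⟩
        have hstack' : ∀ q ∈ F.1.reverse ++ rest, pvEmptyB board size q = true := by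
          intro q hq
          rcases List.mem_append.mp hq with h1 | h1
          · rw [List.mem_reverse, hF1] at h1
            exact (List.mem_filter.mp h1).2
          · exact hstack q (by simp [h1])
        have hcl' : pvClosedRel board size (v ++ [p]) (F.1.reverse ++ rest) := by
          intro a ha q hq hqe
          rcases List.mem_append.mp ha with ha' | ha'
          · rcases hcl a ha' q hq hqe with h1 | h1
            · exact .inl (List.mem_append_left _ h1)
            · rcases List.mem_cons.mp h1 with rfl | h2
              · exact .inl (by simp)
              · exact .inr (List.mem_append_right _ h2)
          · have hap : a = p := by simpa using ha'
            subst hap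
            refine .inr (List.mem_append_left _ ?_)
            rw [List.mem_reverse, hF1]
            exact List.mem_filter.mpr ⟨hq, hqe⟩
        have hfuel' : (F.1.reverse ++ rest).length
            + 5 * ((pvEmpties board size).filter (fun x => !(PySem.Set.contains (v ++ [p]) x))).length ≤ n := by
          have hlen4 : F.1.length ≤ 4 := by
            rw [hF1]
            exact (List.length_filter_le _ _).trans (by simp [nbrsB])
          have hfree := pvFree_succ board size v p (mem_pvEmpties.mpr hpe) hpv
          simp only [List.length_append, List.length_reverse, List.length_cons] at hfuel ⊢
          omega
        obtain ⟨nw', E1, E2, E3, E4, E5, E6⟩ := ih (F.1.reverse ++ rest) (v ++ [p]) (g ++ [p])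
          F.2 hv' (D3 hcols) hstack' hcl' hfuel'
        have key : ∀ q, (q ∈ v ∨ ∃ t ∈ (p :: rest), pvReach board size t q)
            ↔ (q ∈ v ++ [p] ∨ ∃ t ∈ F.1.reverse ++ rest, pvReach board size t q) := by
          intro q
          constructor
          · rintro (h1 | ⟨t, ht, hr⟩)
            · exact .inl (List.mem_append_left _ h1)
            · rcases List.mem_cons.mp ht with rfl | ht'
              · exact pvReach_escape hcl' (by simp) hr
              · exact .inr ⟨t, List.mem_append_right _ ht', hr⟩
          · rintro (h1 | ⟨t, ht, hr⟩)
            · rcases List.mem_append.mp h1 with h2 | h2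
              · exact .inl h2
              · have : q = p := by simpa using h2
                subst this
                exact .inr ⟨q, by simp, .refl q⟩
            · rcases List.mem_append.mp ht with h2 | h2
              · rw [List.mem_reverse, hF1] at h2
                obtain ⟨hmem, hemp⟩ := List.mem_filter.mp h2
                exact .inr ⟨p, by simp, pvReach_trans (.step (.refl p) hmem hemp) hr⟩
              · exact .inr ⟨t, by simp [h2], hr⟩
        refine ⟨p :: nw', ?_, ?_, ?_, ?_, ?_, ?_⟩
        · rw [hred, E1]; simp
        · rw [hred, E2]; simp
        · simpa using E3
        · intro q
          have hq1 : q ∈ v ++ p :: nw' ↔ q ∈ (v ++ [p]) ++ nw' := by simp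
          rw [hq1, E4 q, ← key q]
        · intro c
          rw [hred, E5 c]
          have hD2 := D2 c
          simp only [List.mem_cons] at hD2 ⊢
          constructor
          · rintro (h1 | ⟨x, hx, hb⟩)
            · rcases hD2.mp h1 with h2 | h2
              · exact .inl h2
              · exact .inr ⟨p, .inl rfl, h2⟩
            · exact .inr ⟨x, .inr hx, hb⟩
          · rintro (h1 | ⟨x, (rfl | hx), hb⟩)
            · exact .inl (hD2.mpr (.inl h1))
            · exact .inl (hD2.mpr (.inr hb))
            · exact .inr ⟨x, hx, hb⟩
        · rw [hred]; exact E6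

lemma satInner_spec (E : PySem.Set (Int × Int)) :
    ∀ (l : List (Int × Int)) (acc : PySem.Set (Int × Int)), acc.Nodup →
    ∃ t, l.foldl (fun new nb => if PySem.Set.contains E nb then PySem.Set.add new nb else new) acc
        = acc ++ t ∧
      (acc ++ t).Nodup ∧ (∀ q, q ∈ acc ++ t ↔ q ∈ acc ∨ (q ∈ l ∧ q ∈ E)) := by
  intro l
  induction l with
  | nil => intro acc h; exact ⟨[], by simp, by simpa using h, by simp⟩
  | cons nb t ih =>
    intro acc h
    simp only [List.foldl_cons]
    by_cases hE : nb ∈ E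
    · rw [if_pos (show PySem.Set.contains E nb = true by
        simp [PySem.Set.contains_eq_listContains, List.contains_eq_mem, hE])]
      by_cases hmem : nb ∈ acc
      · rw [PySem.Set.add_of_mem hmem]
        obtain ⟨t', h1, h2, h3⟩ := ih acc h
        refine ⟨t', h1, h2, fun q => ?_⟩
        rw [h3 q]; simp only [List.mem_cons]
        constructor
        · rintro (h' | ⟨h', hE'⟩)
          · exact .inl h'
          · exact .inr ⟨.inr h', hE'⟩
        · rintro (h' | ⟨(rfl | h'), hE'⟩)
          · exact .inl h'
          · exact .inl hmem
          · exact .inr ⟨h', hE'⟩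
      · rw [PySem.Set.add_of_not_mem hmem]
        have hnd : (acc ++ [nb]).Nodup := by
          rw [List.nodup_append]
          exact ⟨h, List.nodup_singleton nb, fun a ha b hb => by
            simp only [List.mem_singleton] at hb; subst hb; exact fun hh => hmem (hh ▸ ha)⟩
        obtain ⟨t', h1, h2, h3⟩ := ih (acc ++ [nb]) hnd
        refine ⟨nb :: t', by simpa using h1, by simpa using h2, fun q => ?_⟩
        have hq := h3 q
        have hiff : q ∈ acc ++ nb :: t' ↔ q ∈ acc ++ [nb] ++ t' := by simp
        rw [hiff, hq]
        simp only [List.mem_append, List.mem_cons, List.not_mem_nil, or_false]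
        constructor
        · rintro ((h' | rfl) | ⟨h', hE'⟩)
          · exact .inl h'
          · exact .inr ⟨.inl rfl, hE⟩
          · exact .inr ⟨.inr h', hE'⟩
        · rintro (h' | ⟨(rfl | h'), hE'⟩)
          · exact .inl (.inl h')
          · exact .inl (.inr rfl)
          · exact .inr ⟨h', hE'⟩
    · rw [if_neg (show ¬ PySem.Set.contains E nb = true by
        simp [PySem.Set.contains_eq_listContains, List.contains_eq_mem, hE])]
      obtain ⟨t', h1, h2, h3⟩ := ih acc h
      refine ⟨t', h1, h2, fun q => ?_⟩
      rw [h3 q]; simp only [List.mem_cons]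
      constructor
      · rintro (h' | ⟨h', hE'⟩)
        · exact .inl h'
        · exact .inr ⟨.inr h', hE'⟩
      · rintro (h' | ⟨(rfl | h'), hE'⟩)
        · exact .inl h'
        · exact absurd hE' hE
        · exact .inr ⟨h', hE'⟩

lemma satStep_spec (E comp : PySem.Set (Int × Int)) (h : comp.Nodup) :
    ∃ t, satStep E comp = comp ++ t ∧ (comp ++ t).Nodup ∧
      (∀ q, q ∈ comp ++ t ↔ q ∈ comp ∨ (q ∈ E ∧ ∃ p ∈ comp, q ∈ nbrsB p)) := by
  have H : ∀ (l : List (Int × Int)) (acc : PySem.Set (Int × Int)), acc.Nodup →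
      ∃ t, l.foldl (fun new p => (nbrsB p).foldl
          (fun new nb => if PySem.Set.contains E nb then PySem.Set.add new nb else new) new) acc
        = acc ++ t ∧ (acc ++ t).Nodup ∧
        (∀ q, q ∈ acc ++ t ↔ q ∈ acc ∨ (q ∈ E ∧ ∃ p ∈ l, q ∈ nbrsB p)) := by
    intro l
    induction l with
    | nil => intro acc h; exact ⟨[], by simp, by simpa using h, by simp⟩
    | cons p l' ih =>
      intro acc h
      simp only [List.foldl_cons]
      obtain ⟨t1, g1, g2, g3⟩ := satInner_spec E (nbrsB p) acc h
      rw [g1]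
      obtain ⟨t2, h1, h2, h3⟩ := ih (acc ++ t1) g2
      refine ⟨t1 ++ t2, ?_, ?_, ?_⟩
      · rw [h1]; simp [List.append_assoc]
      · simpa [List.append_assoc] using h2
      intro q
      have hq3 := h3 q
      have hq4 : q ∈ acc ++ (t1 ++ t2) ↔ q ∈ acc ++ t1 ++ t2 := by
        simp [List.append_assoc]
      rw [hq4, hq3]
      simp only [g3 q, List.mem_cons]
      constructor
      · rintro ((h' | ⟨hn, hE'⟩) | ⟨hE', p', hp', hn⟩)
        · exact .inl h'
        · exact .inr ⟨hE', p, .inl rfl, hn⟩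
        · exact .inr ⟨hE', p', .inr hp', hn⟩
      · rintro (h' | ⟨hE', p', (rfl | hp'), hn⟩)
        · exact .inl (.inl h')
        · exact .inl (.inr ⟨hn, hE'⟩)
        · exact .inr ⟨hE', p', hp', hn⟩
  exact H comp comp h

lemma equal_append_iff (comp t : List (Int × Int)) (h : (comp ++ t).Nodup) :
    PySem.Set.equal (comp ++ t) comp = true ↔ t = [] := by
  cases t with
  | nil => simp [PySem.Set.equal_iff]
  | cons a t' =>
    simp only [reduceCtorEq, iff_false]
    intro heq
    have hmem : a ∈ comp := ((PySem.Set.equal_iff _ _).mp heq a).mp (by simp)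
    rcases List.nodup_append.mp h with ⟨_, _, hdisj⟩
    exact hdisj a hmem a (by simp) rfl

lemma saturate_sound (board : List (List (Option String))) (size : Int) (s : Int × Int) :
    ∀ (fuel : Nat) (comp : PySem.Set (Int × Int)), comp.Nodup →
    (∀ q ∈ comp, pvReach board size s q) →
    (saturate (pvEmpties board size) fuel comp).Nodup ∧
    (∀ q ∈ comp, q ∈ saturate (pvEmpties board size) fuel comp) ∧
    (∀ q ∈ saturate (pvEmpties board size) fuel comp, pvReach board size s q) := by
  intro fuel
  induction fuel with
  | zero => intro comp h hr; exact ⟨h, fun q hq => hq, hr⟩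
  | succ n ih =>
    intro comp h hr
    obtain ⟨t, heq, hnd, hmem⟩ := satStep_spec (pvEmpties board size) comp h
    simp only [saturate, heq]
    by_cases hb : PySem.Set.equal (comp ++ t) comp = true
    · rw [if_pos hb]; exact ⟨h, fun q hq => hq, hr⟩
    · rw [if_neg hb]
      have hr' : ∀ q ∈ comp ++ t, pvReach board size s q := by
        intro q hq
        rcases (hmem q).mp hq with h1 | ⟨hE, p, hp, hnb⟩
        · exact hr _ h1
        · exact .step (hr _ hp) hnb (mem_pvEmpties.mp hE)
      obtain ⟨H1, H2, H3⟩ := ih (comp ++ t) hnd hr'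
      exact ⟨H1, fun q hq => H2 q (List.mem_append_left _ hq), H3⟩

lemma saturate_fix (board : List (List (Option String))) (size : Int) :
    ∀ (fuel : Nat) (comp : PySem.Set (Int × Int)), comp.Nodup →
    (∀ q ∈ comp, q ∈ pvEmpties board size) →
    (pvEmpties board size).length + 1 ≤ fuel + comp.length →
    ∀ p ∈ saturate (pvEmpties board size) fuel comp, ∀ q ∈ nbrsB p,
      pvEmptyB board size q = true → q ∈ saturate (pvEmpties board size) fuel comp := by
  intro fuel
  induction fuel with
  | zero =>
    intro comp h hsub hlen p hp q hq hqe
    exfalso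
    have := (List.subperm_of_subset h (fun x hx => hsub x hx)).length_le
    omega
  | succ n ih =>
    intro comp h hsub hlen
    obtain ⟨t, heq, hnd, hmem⟩ := satStep_spec (pvEmpties board size) comp h
    simp only [saturate, heq]
    by_cases hb : PySem.Set.equal (comp ++ t) comp = true
    · rw [if_pos hb]
      have ht : t = [] := (equal_append_iff _ _ hnd).mp hb
      subst ht
      intro p hp q hq hqe
      have : q ∈ comp ++ ([] : List (Int × Int)) :=
        (hmem q).mpr (.inr ⟨mem_pvEmpties.mpr hqe, p, hp, hq⟩)
      simpa using this
    · rw [if_neg hb]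
      have ht : t ≠ [] := fun hh => hb ((equal_append_iff _ _ hnd).mpr hh)
      apply ih (comp ++ t) hnd
      · intro q hq
        rcases (hmem q).mp hq with h1 | ⟨hE, _⟩
        · exact hsub q h1
        · exact hE
      · have h1 : 1 ≤ t.length := by
          cases t with
          | nil => exact absurd rfl ht
          | cons a t' => simp
        simp only [List.length_append]; omega

lemma comp_spec (board : List (List (Option String))) (size : Int) (start : Int × Int)
    (fuel : Nat) (hstart : pvEmptyB board size start = true)
    (hfuel : (pvEmpties board size).length ≤ fuel) :
    (saturate (pvEmpties board size) fuel (PySem.Set.add PySem.Set.empty start)).Nodup ∧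
    (∀ q, q ∈ saturate (pvEmpties board size) fuel (PySem.Set.add PySem.Set.empty start) ↔
      pvReach board size start q) := by
  have h0 : (PySem.Set.add PySem.Set.empty start) = [start] := rfl
  rw [h0]
  obtain ⟨H1, H2, H3⟩ := saturate_sound board size start fuel [start]
    (List.nodup_singleton start)
    (fun q hq => by rw [List.mem_singleton] at hq; subst hq; exact .refl _)
  have hfix := saturate_fix board size fuel [start] (List.nodup_singleton start)
    (fun q hq => by rw [List.mem_singleton] at hq; subst hq; exact mem_pvEmpties.mpr hstart)
    (by simp only [List.length_singleton]; omega)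
  refine ⟨H1, fun q => ⟨H3 q, fun hreach => ?_⟩⟩
  induction hreach with
  | refl => exact H2 _ (by simp)
  | step hr hmem hemp ih => exact hfix _ ih _ hmem hemp

lemma bordersOf_spec (board : List (List (Option String))) (size : Int)
    (comp : PySem.Set (Int × Int)) :
    (bordersOf board size comp).Nodup ∧
    (∀ c, c ∈ bordersOf board size comp ↔ ∃ p ∈ comp, pvBorder board size p c) := by
  have HI : ∀ (l : List (Int × Int)) (acc : PySem.Set String), acc.Nodup →
      (l.foldl (fun bs nb =>
        if pvInR size nb then
          match boardGet board nb.1 nb.2 with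
          | some col => PySem.Set.add bs col
          | none => bs
        else bs) acc).Nodup ∧
      (∀ c, c ∈ l.foldl (fun bs nb =>
        if pvInR size nb then
          match boardGet board nb.1 nb.2 with
          | some col => PySem.Set.add bs col
          | none => bs
        else bs) acc ↔ c ∈ acc ∨ ∃ nb ∈ l, pvInR size nb = true ∧
          boardGet board nb.1 nb.2 = some c) := by
    intro l
    induction l with
    | nil => intro acc h; exact ⟨h, fun c => by simp⟩
    | cons nb t ih =>
      intro acc h
      simp only [List.foldl_cons]
      by_cases hin : pvInR size nb
      · rcases hbg : boardGet board nb.1 nb.2 with _ | col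
        · obtain ⟨I1, I2⟩ := ih acc h
          refine ⟨?_, fun c => ?_⟩
          · simpa [hin, hbg] using I1
          · have h2 := I2 c
            simp only [hin, if_true] at h2 ⊢
            rw [h2]; simp only [List.mem_cons]
            constructor
            · rintro (h' | ⟨n, hn, g1, g2⟩)
              · exact .inl h'
              · exact .inr ⟨n, .inr hn, g1, g2⟩
            · rintro (h' | ⟨n, (rfl | hn), g1, g2⟩)
              · exact .inl h'
              · rw [hbg] at g2; cases g2
              · exact .inr ⟨n, hn, g1, g2⟩
        · obtain ⟨I1, I2⟩ := ih (PySem.Set.add acc col) (PySem.Set.nodup_add _ _ h)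
          refine ⟨?_, fun c => ?_⟩
          · simpa [hin, hbg] using I1
          · have h2 := I2 c
            simp only [hin, if_true] at h2 ⊢
            rw [h2]; simp only [PySem.Set.mem_add, List.mem_cons]
            constructor
            · rintro ((h' | rfl) | ⟨n, hn, g1, g2⟩)
              · exact .inl h'
              · exact .inr ⟨nb, .inl rfl, hin, hbg⟩
              · exact .inr ⟨n, .inr hn, g1, g2⟩
            · rintro (h' | ⟨n, (rfl | hn), g1, g2⟩)
              · exact .inl (.inl h')
              · rw [hbg] at g2; cases g2; exact .inl (.inr rfl)
              · exact .inr ⟨n, hn, g1, g2⟩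
      · have hnin : pvInR size nb = false := by rw [← Bool.not_eq_true]; exact hin
        obtain ⟨I1, I2⟩ := ih acc h
        refine ⟨?_, fun c => ?_⟩
        · simpa [hnin] using I1
        · have h2 := I2 c
          simp only [hnin, Bool.false_eq_true, if_false] at h2 ⊢
          rw [h2]; simp only [List.mem_cons]
          constructor
          · rintro (h' | ⟨n, hn, g1, g2⟩)
            · exact .inl h'
            · exact .inr ⟨n, .inr hn, g1, g2⟩
          · rintro (h' | ⟨n, (rfl | hn), g1, g2⟩)
            · exact .inl h'
            · rw [hnin] at g1; cases g1
            · exact .inr ⟨n, hn, g1, g2⟩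
  have H : ∀ (l : List (Int × Int)) (acc : PySem.Set String), acc.Nodup →
      (l.foldl (fun bs p => (nbrsB p).foldl (fun bs nb =>
        if pvInR size nb then
          match boardGet board nb.1 nb.2 with
          | some col => PySem.Set.add bs col
          | none => bs
        else bs) bs) acc).Nodup ∧
      (∀ c, c ∈ l.foldl (fun bs p => (nbrsB p).foldl (fun bs nb =>
        if pvInR size nb then
          match boardGet board nb.1 nb.2 with
          | some col => PySem.Set.add bs col
          | none => bs
        else bs) bs) acc ↔ c ∈ acc ∨ ∃ p ∈ l, pvBorder board size p c) := by
    intro l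
    induction l with
    | nil => intro acc h; exact ⟨h, fun c => by simp⟩
    | cons p l' ih =>
      intro acc h
      simp only [List.foldl_cons]
      obtain ⟨I1, I2⟩ := HI (nbrsB p) acc h
      obtain ⟨J1, J2⟩ := ih _ I1
      refine ⟨J1, fun c => ?_⟩
      rw [J2 c, I2 c]
      simp only [pvBorder, List.mem_cons]
      constructor
      · rintro ((h' | ⟨n, hn, g1, g2⟩) | ⟨p', hp', hb⟩)
        · exact .inl h'
        · exact .inr ⟨p, .inl rfl, n, hn, g1, g2⟩
        · exact .inr ⟨p', .inr hp', hb⟩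
      · rintro (h' | ⟨p', (rfl | hp'), hb⟩)
        · exact .inl (.inl h')
        · exact .inl (.inr hb)
        · exact .inr ⟨p', hp', hb⟩
  unfold bordersOf
  obtain ⟨H1, H2⟩ := H comp PySem.Set.empty (by simp [PySem.Set.empty])
  refine ⟨H1, fun c => ?_⟩
  rw [H2 c]
  simp [PySem.Set.empty]

/-- The simulation invariant between A's fold state and B's fold state. -/
def pvStateInv (board : List (List (Option String))) (size : Int)
    (sa sb : PySem.Set (Int × Int) × Int × Int) : Prop :=
  sa.2 = sb.2 ∧ sa.1.Nodup ∧ sb.1.Nodup ∧ (∀ q, q ∈ sa.1 ↔ q ∈ sb.1) ∧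
  (∀ q ∈ sa.1, pvEmptyB board size q = true) ∧ pvClosedRel board size sa.1 []

lemma foldl_sim {σ₁ σ₂ : Type} (R : σ₁ → σ₂ → Prop) (f : σ₁ → Int × Int → σ₁)
    (g : σ₂ → Int × Int → σ₂) :
    ∀ (l : List (Int × Int)) (s₁ : σ₁) (s₂ : σ₂), R s₁ s₂ →
    (∀ x ∈ l, ∀ a b, R a b → R (f a x) (g b x)) →
    R (l.foldl f s₁) (l.foldl g s₂) := by
  intro l
  induction l with
  | nil => intro s₁ s₂ h _; exact h
  | cons a t ih =>
    intro s₁ s₂ h hstep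
    exact ih _ _ (hstep a (by simp) _ _ h) (fun x hx => hstep x (by simp [hx]))

/-- A's outer-loop step, with the row/column pair fused and the emptiness guard
already discharged (it runs only on cells of `pvEmpties`). -/
def pvAStep (board : List (List (Option String))) (size : Int)
    (acc : PySem.Set (Int × Int) × Int × Int) (rc : Int × Int) :
    PySem.Set (Int × Int) × Int × Int :=
  if rc ∈ acc.1 then acc
  else
    let st := fillA board size (1 + 5 * (size.toNat * size.toNat)) [rc] acc.1 [] PySem.Set.empty
    match st.2.2 with
    | [col] =>
      if col = "black" then (st.1, acc.2.1 + (st.2.1.length : Int), acc.2.2)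
      else if col = "white" then (st.1, acc.2.1, acc.2.2 + (st.2.1.length : Int))
      else (st.1, acc.2.1, acc.2.2)
    | _ => (st.1, acc.2.1, acc.2.2)

/-- B's outer-loop step. -/
def pvBStep (board : List (List (Option String))) (size : Int)
    (acc : PySem.Set (Int × Int) × Int × Int) (start : Int × Int) :
    PySem.Set (Int × Int) × Int × Int :=
  if PySem.Set.contains acc.1 start then acc
  else
    let comp := saturate (PySem.Set.ofList (pvEmpties board size)) ((size * size).toNat)
      (PySem.Set.add PySem.Set.empty start)
    let visited' := PySem.Set.update acc.1 comp
    let borders := bordersOf board size comp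
    if borders.length = 1 then
      let col := borders.headD ""
      if col = "black" then (visited', acc.2.1 + (comp.length : Int), acc.2.2)
      else if col = "white" then (visited', acc.2.1, acc.2.2 + (comp.length : Int))
      else (visited', acc.2.1, acc.2.2)
    else (visited', acc.2.1, acc.2.2)

lemma getB_eq (board : List (List (Option String))) (size : Int) :
    get_territory_alt board size
      = ((pvEmpties board size).foldl (pvBStep board size) (PySem.Set.empty, 0, 0)).2 := rfl

lemma getA_eq (board : List (List (Option String))) (size : Int) :
    get_territory board size
      = ((pvEmpties board size).foldl (pvAStep board size) (PySem.Set.empty, 0, 0)).2 := by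
  unfold get_territory
  -- 1. fuse the two nested loops into one loop over all (row, column) pairs
  have e1 : (PySem.List.pyRange 0 size 1).foldl
      (fun (acc : PySem.Set (Int × Int) × Int × Int) r =>
        (PySem.List.pyRange 0 size 1).foldl
          (fun acc c =>
            if boardGetA board r c = none ∧ ¬ ((r, c) ∈ acc.1) then
              let st := fillA board size (1 + 5 * (size.toNat * size.toNat)) [(r, c)] acc.1 [] PySem.Set.empty
              match st.2.2 with
              | [col] =>
                if col = "black" then (st.1, acc.2.1 + (st.2.1.length : Int), acc.2.2)
                else if col = "white" then (st.1, acc.2.1, acc.2.2 + (st.2.1.length : Int))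
                else (st.1, acc.2.1, acc.2.2)
              | _ => (st.1, acc.2.1, acc.2.2)
            else acc)
          acc)
      (PySem.Set.empty, 0, 0)
    = ((PySem.List.pyRange 0 size 1).flatMap
        (fun r => (PySem.List.pyRange 0 size 1).map (fun c => (r, c)))).foldl
      (fun (acc : PySem.Set (Int × Int) × Int × Int) rc =>
        if boardGetA board rc.1 rc.2 = none ∧ ¬ (rc ∈ acc.1) then
          let st := fillA board size (1 + 5 * (size.toNat * size.toNat)) [rc] acc.1 [] PySem.Set.empty
          match st.2.2 with
          | [col] =>
            if col = "black" then (st.1, acc.2.1 + (st.2.1.length : Int), acc.2.2)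
            else if col = "white" then (st.1, acc.2.1, acc.2.2 + (st.2.1.length : Int))
            else (st.1, acc.2.1, acc.2.2)
          | _ => (st.1, acc.2.1, acc.2.2)
        else acc)
      (PySem.Set.empty, 0, 0) := by
    rw [List.foldl_flatMap]
    apply PySem.List.foldl_congr_mem
    intro acc r _
    rw [List.foldl_map]
  -- 2. split the guard: on an empty cell A's step is pvAStep
  have e2 : ((PySem.List.pyRange 0 size 1).flatMap
        (fun r => (PySem.List.pyRange 0 size 1).map (fun c => (r, c)))).foldl
      (fun (acc : PySem.Set (Int × Int) × Int × Int) rc =>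
        if boardGetA board rc.1 rc.2 = none ∧ ¬ (rc ∈ acc.1) then
          let st := fillA board size (1 + 5 * (size.toNat * size.toNat)) [rc] acc.1 [] PySem.Set.empty
          match st.2.2 with
          | [col] =>
            if col = "black" then (st.1, acc.2.1 + (st.2.1.length : Int), acc.2.2)
            else if col = "white" then (st.1, acc.2.1, acc.2.2 + (st.2.1.length : Int))
            else (st.1, acc.2.1, acc.2.2)
          | _ => (st.1, acc.2.1, acc.2.2)
        else acc)
      (PySem.Set.empty, 0, 0)
    = ((PySem.List.pyRange 0 size 1).flatMap
        (fun r => (PySem.List.pyRange 0 size 1).map (fun c => (r, c)))).foldl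
      (fun (acc : PySem.Set (Int × Int) × Int × Int) rc =>
        if boardGetA board rc.1 rc.2 = none then pvAStep board size acc rc else acc)
      (PySem.Set.empty, 0, 0) := by
    apply PySem.List.foldl_congr_mem
    intro acc rc _
    by_cases h1 : boardGetA board rc.1 rc.2 = none <;>
      by_cases h2 : rc ∈ acc.1 <;>
      simp [pvAStep, h1, h2]
  -- 3. push the emptiness test into a filter; the filtered list is pvEmpties
  have e3 : ((PySem.List.pyRange 0 size 1).flatMap
        (fun r => (PySem.List.pyRange 0 size 1).map (fun c => (r, c)))).filter
      (fun rc : Int × Int => decide (boardGetA board rc.1 rc.2 = none))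
      = pvEmpties board size := by
    have hrow : ∀ r : Int,
        ((PySem.List.pyRange 0 size 1).map (fun c => (r, c))).filter
          (fun rc : Int × Int => decide (boardGetA board rc.1 rc.2 = none))
        = ((PySem.List.pyRange 0 size 1).filter (fun c => boardGet board r c == none)).map
            (fun c => (r, c)) := by
      intro r
      rw [List.filter_map]
      congr 1
      apply List.filter_congr
      intro c _
      cases hx : boardGet board r c <;>
        simp [Function.comp, show boardGetA = boardGet from rfl, hx]
    have gen : ∀ l : List Int,
        (l.flatMap (fun r => (PySem.List.pyRange 0 size 1).map (fun c => (r, c)))).filter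
          (fun rc : Int × Int => decide (boardGetA board rc.1 rc.2 = none))
        = l.flatMap (fun r => ((PySem.List.pyRange 0 size 1).filter
            (fun c => boardGet board r c == none)).map (fun c => (r, c))) := by
      intro l
      induction l with
      | nil => rfl
      | cons x t ihl => rw [List.flatMap_cons, List.flatMap_cons, List.filter_append, ihl, hrow x]
    exact gen _
  show ((PySem.List.pyRange 0 size 1).foldl _ (PySem.Set.empty, 0, 0)).2 = _
  rw [e1, e2, PySem.List.foldl_ite_eq_foldl_filter
    (p := fun rc : Int × Int => boardGetA board rc.1 rc.2 = none)
    (f := pvAStep board size), e3]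

lemma pvVisited_facts (board : List (List (Option String))) (size : Int)
    (a1 b1 nw comp : PySem.Set (Int × Int))
    (hbnd : b1.Nodup) (hmem : ∀ q, q ∈ a1 ↔ q ∈ b1)
    (hemp : ∀ q ∈ a1, pvEmptyB board size q = true)
    (hcl : pvClosedRel board size a1 [])
    (start : Int × Int)
    (hse : pvEmptyB board size start = true)
    (hnwmem : ∀ q, q ∈ nw ↔ q ∈ comp)
    (hB2 : ∀ q, q ∈ comp ↔ pvReach board size start q) :
    (PySem.Set.update b1 comp).Nodup ∧
    (∀ q, q ∈ a1 ++ nw ↔ q ∈ PySem.Set.update b1 comp) ∧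
    (∀ q ∈ a1 ++ nw, pvEmptyB board size q = true) ∧
    pvClosedRel board size (a1 ++ nw) [] := by
  refine ⟨PySem.Set.nodup_update _ _ hbnd, ?_, ?_, ?_⟩
  · intro q
    rw [PySem.Set.mem_update, List.mem_append, hmem q, hnwmem q]
  · intro q hq
    rcases List.mem_append.mp hq with h | h
    · exact hemp q h
    · exact pvReach_empty hse ((hB2 q).mp ((hnwmem q).mp h))
  · intro p hp q hq hqe
    rcases List.mem_append.mp hp with h | h
    · rcases hcl p h q hq hqe with h1 | h1
      · exact .inl (List.mem_append_left _ h1)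
      · cases h1
    · have hr : pvReach board size start p := (hB2 p).mp ((hnwmem p).mp h)
      exact .inl (List.mem_append_right _ ((hnwmem q).mpr ((hB2 q).mpr (.step hr hq hqe))))

def pvDispatch (v : PySem.Set (Int × Int)) (cols : List String) (cnt : Int × Int) (n : Int) :
    PySem.Set (Int × Int) × Int × Int :=
  match cols with
  | [col] => if col = "black" then (v, cnt.1 + n, cnt.2)
             else if col = "white" then (v, cnt.1, cnt.2 + n)
             else (v, cnt.1, cnt.2)
  | _ => (v, cnt.1, cnt.2)

def pvDispatchB (v : PySem.Set (Int × Int)) (cols : List String) (cnt : Int × Int) (n : Int) :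
    PySem.Set (Int × Int) × Int × Int :=
  if cols.length = 1 then
    let col := cols.headD ""
    if col = "black" then (v, cnt.1 + n, cnt.2)
    else if col = "white" then (v, cnt.1, cnt.2 + n)
    else (v, cnt.1, cnt.2)
  else (v, cnt.1, cnt.2)

lemma pvFinish (board : List (List (Option String))) (size : Int)
    (va vb : PySem.Set (Int × Int)) (ca cb : List String)
    (cnt : Int × Int) (nA nB : Int)
    (hperm : ca.Perm cb) (hn : nA = nB)
    (hvn : va.Nodup) (hvbn : vb.Nodup) (hvm : ∀ q, q ∈ va ↔ q ∈ vb)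
    (hve : ∀ q ∈ va, pvEmptyB board size q = true)
    (hvc : pvClosedRel board size va []) :
    pvStateInv board size (pvDispatch va ca cnt nA) (pvDispatchB vb cb cnt nB) := by
  subst hn
  have hbase : pvStateInv board size (va, cnt.1, cnt.2) (vb, cnt.1, cnt.2) :=
    ⟨rfl, hvn, hvbn, hvm, hve, hvc⟩
  rcases ca with _ | ⟨c1, _ | ⟨c2, t⟩⟩
  · have hcb : cb = [] := hperm.symm.eq_nil
    subst hcb
    exact hbase
  · have hcb : cb = [c1] := List.perm_singleton.mp hperm.symm
    subst hcb
    show pvStateInv board size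
      (if c1 = "black" then (va, cnt.1 + nA, cnt.2)
       else if c1 = "white" then (va, cnt.1, cnt.2 + nA)
       else (va, cnt.1, cnt.2))
      (if c1 = "black" then (vb, cnt.1 + nA, cnt.2)
       else if c1 = "white" then (vb, cnt.1, cnt.2 + nA)
       else (vb, cnt.1, cnt.2))
    by_cases h1 : c1 = "black"
    · rw [if_pos h1, if_pos h1]
      exact ⟨rfl, hvn, hvbn, hvm, hve, hvc⟩
    · rw [if_neg h1, if_neg h1]
      by_cases h2 : c1 = "white"
      · rw [if_pos h2, if_pos h2]
        exact ⟨rfl, hvn, hvbn, hvm, hve, hvc⟩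
      · rw [if_neg h2, if_neg h2]
        exact hbase
  · have hlen := hperm.length_eq
    rcases cb with _ | ⟨d1, _ | ⟨d2, dt⟩⟩
    · simp at hlen
    · simp at hlen
    · show pvStateInv board size (va, cnt.1, cnt.2)
        (if (d1 :: d2 :: dt).length = 1 then
          if (d1 :: d2 :: dt).headD "" = "black" then (vb, cnt.1 + nA, cnt.2)
          else if (d1 :: d2 :: dt).headD "" = "white" then (vb, cnt.1, cnt.2 + nA)
          else (vb, cnt.1, cnt.2)
        else (vb, cnt.1, cnt.2))
      rw [if_neg (by simp)]
      exact hbase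

lemma pvStep_sim (board : List (List (Option String))) (size : Int) :
    ∀ start ∈ pvEmpties board size, ∀ (a b : PySem.Set (Int × Int) × Int × Int),
    pvStateInv board size a b →
    pvStateInv board size (pvAStep board size a start) (pvBStep board size b start) := by
  intro start hstartmem a b hinv
  obtain ⟨hout, hand, hbnd, hmem, hemp, hcl⟩ := hinv
  have hstart : pvEmptyB board size start = true := mem_pvEmpties.mp hstartmem
  unfold pvAStep pvBStep
  by_cases hsv : start ∈ a.1
  · rw [if_pos hsv, if_pos (show PySem.Set.contains b.1 start = true by
      simp [PySem.Set.contains_eq_listContains, List.contains_eq_mem, (hmem start).mp hsv])]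
    exact ⟨hout, hand, hbnd, hmem, hemp, hcl⟩
  · rw [if_neg hsv, if_neg (show ¬ PySem.Set.contains b.1 start = true by
      simp only [PySem.Set.contains_eq_listContains, List.contains_eq_mem, decide_eq_true_eq]
      exact fun h => hsv ((hmem start).mpr h))]
    -- A side: run the flood fill
    have hcl1 : pvClosedRel board size a.1 [start] := by
      intro p hp q hq hqe
      rcases hcl p hp q hq hqe with h | h
      · exact .inl h
      · cases h
    have hfuel1 : ([start] : List (Int × Int)).length
        + 5 * ((pvEmpties board size).filter (fun x => !(PySem.Set.contains a.1 x))).length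
        ≤ 1 + 5 * (size.toNat * size.toNat) := by
      have h1 : ((pvEmpties board size).filter (fun x => !(PySem.Set.contains a.1 x))).length
          ≤ (pvEmpties board size).length := List.length_filter_le _ _
      have h2 := length_pvEmpties_le (board := board) (size := size)
      simp only [List.length_singleton]
      omega
    obtain ⟨nw, A1, A2, A3, A4, A5, A6⟩ := fillA_spec board size
      (1 + 5 * (size.toNat * size.toNat)) [start] a.1 [] PySem.Set.empty hand
      (by simp [PySem.Set.empty])
      (by intro q hq; rw [List.mem_singleton] at hq; subst hq; exact hstart)
      hcl1 hfuel1
    -- B side: saturate the component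
    have hpos : 0 < size := by
      have h := hstart
      simp only [pvEmptyB, pvInR, Bool.and_eq_true, decide_eq_true_eq] at h
      omega
    have hfuel2 : (pvEmpties board size).length ≤ (size * size).toNat := by
      refine length_pvEmpties_le.trans ?_
      have h0 : size.toNat * size.toNat = (size * size).toNat := by
        rcases Int.eq_ofNat_of_zero_le (le_of_lt hpos) with ⟨m, rfl⟩
        rw [← Int.natCast_mul, Int.toNat_natCast, Int.toNat_natCast]
      omega
    simp only [PySem.Set.ofList_eq_self_of_nodup _ (nodup_pvEmpties (board := board) (size := size))]
    obtain ⟨B1, B2⟩ := comp_spec board size start ((size * size).toNat) hstart hfuel2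
    -- the new cells of A are exactly B's component
    have hreach_not_v : ∀ q, pvReach board size start q → q ∉ a.1 := by
      intro q hr hqv
      rcases pvReach_escape hcl hqv (pvReach_symm hstart hr) with h | ⟨t, ht, _⟩
      · exact hsv h
      · cases ht
    have hnwmem : ∀ q, q ∈ nw ↔ q ∈ saturate (pvEmpties board size) ((size * size).toNat)
        (PySem.Set.add PySem.Set.empty start) := by
      intro q
      rw [B2 q]
      constructor
      · intro hq
        rcases (A4 q).mp (List.mem_append_right _ hq) with h2 | ⟨t, ht, hr⟩
        · exfalso
          rcases List.nodup_append.mp A3 with ⟨_, _, hdis⟩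
          exact hdis q h2 q hq rfl
        · have ht' : t = start := by simpa using ht
          exact ht' ▸ hr
      · intro hr
        rcases List.mem_append.mp ((A4 q).mpr (.inr ⟨start, by simp, hr⟩)) with h2 | h2
        · exact absurd h2 (hreach_not_v q hr)
        · exact h2
    have hnwnd : nw.Nodup := A3.of_append_right
    have hlen : nw.length = (saturate (pvEmpties board size) ((size * size).toNat)
        (PySem.Set.add PySem.Set.empty start)).length :=
      ((List.perm_ext_iff_of_nodup hnwnd B1).mpr hnwmem).length_eq
    obtain ⟨C1, C2⟩ := bordersOf_spec board size
      (saturate (pvEmpties board size) ((size * size).toNat) (PySem.Set.add PySem.Set.empty start))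
    have hcolmem : ∀ c, c ∈ (fillA board size (1 + 5 * (size.toNat * size.toNat))
        [start] a.1 [] PySem.Set.empty).2.2 ↔ c ∈ bordersOf board size
        (saturate (pvEmpties board size) ((size * size).toNat)
          (PySem.Set.add PySem.Set.empty start)) := by
      intro c
      rw [A5 c, C2 c]
      constructor
      · rintro (h | ⟨x, hx, hb⟩)
        · cases h
        · exact ⟨x, (hnwmem x).mp hx, hb⟩
      · rintro ⟨x, hx, hb⟩
        exact .inr ⟨x, (hnwmem x).mpr hx, hb⟩
    have hcolperm : (fillA board size (1 + 5 * (size.toNat * size.toNat))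
        [start] a.1 [] PySem.Set.empty).2.2.Perm (bordersOf board size
        (saturate (pvEmpties board size) ((size * size).toNat)
          (PySem.Set.add PySem.Set.empty start))) :=
      (List.perm_ext_iff_of_nodup A6 C1).mpr hcolmem
    obtain ⟨hVn, hVm, hVe, hVc⟩ := pvVisited_facts board size a.1 b.1 nw _ hbnd hmem
      hemp hcl start hstart hnwmem (fun q => B2 q)
    have hA2len : ((fillA board size (1 + 5 * (size.toNat * size.toNat))
        [start] a.1 [] PySem.Set.empty).2.1.length : Int)
        = ((saturate (pvEmpties board size) ((size * size).toNat)
            (PySem.Set.add PySem.Set.empty start)).length : Int) := by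
      rw [A2]; simp [hlen]
    -- align the two sides and finish by the colour-set dispatch
    have hA2' : (fillA board size (1 + 5 * (size.toNat * size.toNat))
        [start] a.1 [] PySem.Set.empty).2.1.length = nw.length := by
      rw [A2]; simp
    have hlen' : ((nw.length : Nat) : Int)
        = ((saturate (pvEmpties board size) ((size * size).toNat)
            (PySem.Set.add PySem.Set.empty start)).length : Int) := by
      exact_mod_cast congrArg (fun n : Nat => (n : Int)) hlen
    rw [A1, hA2', ← hout]
    exact pvFinish board size (a.1 ++ nw)
      (PySem.Set.update b.1 (saturate (pvEmpties board size) ((size * size).toNat)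
        (PySem.Set.add PySem.Set.empty start)))
      ((fillA board size (1 + 5 * (size.toNat * size.toNat)) [start] a.1 [] PySem.Set.empty).2.2)
      (bordersOf board size (saturate (pvEmpties board size) ((size * size).toNat)
        (PySem.Set.add PySem.Set.empty start)))
      a.2 (nw.length : Int) _ hcolperm hlen' A3 hVn hVm hVe hVc

lemma main_eq (board : List (List (Option String))) (size : Int) :
    get_territory board size = get_territory_alt board size := by
  rw [getA_eq, getB_eq]
  have hsim := foldl_sim (pvStateInv board size) (pvAStep board size) (pvBStep board size)
    (pvEmpties board size) (PySem.Set.empty, 0, 0) (PySem.Set.empty, 0, 0)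
    ⟨rfl, by simp [PySem.Set.empty], by simp [PySem.Set.empty], fun q => Iff.rfl,
      fun q hq => by simp [PySem.Set.empty] at hq, fun p hp => by simp [PySem.Set.empty] at hp⟩
    (pvStep_sim board size)
  exact hsim.1

-- ===== VERDICT (by name: the statement is the Claim_ definition above) =====
theorem get_territory_spec : Claim_equal_get_territory := by
  unfold Claim_equal_get_territory Spec_get_territory
  intro board size _ _
  exact main_eq board size
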